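-- pv_equiv track=rewrite | github.com/maksverver/AdventOfCode | 2023/13.py | Solve
-- ===== SOURCE A (Python) =====
-- def CheckReflection(a, j, max_errors):
--   '''Returns the number of errors we see when reflecting matrix `a` vertically,
--      using the horizontal line of reflection between rows (j - 1) and (j).'''
--   h = len(a)
--   w = len(a[0])
--   i = j - 1
--   errors = 0
--   while i >= 0 and j < h:
--     for k in range(w):
--       if a[i][k] != a[j][k]:
--         errors += 1
--         if errors > max_errors: break  # optimization
--     i -= 1
--     j += 1
--   return errors
--
-- def Solve(patterns, errors):
--   answer = 0
--   for a in patterns: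
--     b = list(zip(*a))  # transpose a
--     res, = (
--         list(100*r for r in range(1, len(a)) if CheckReflection(a, r, errors) == errors) +
--         list(    c for c in range(1, len(b)) if CheckReflection(b, c, errors) == errors))
--     answer += res
--   return answer
-- ===== SOURCE B (Python) =====
-- def Solve(patterns, errors):
--   answer = 0
--   for a in patterns:
--     matches = []
--     for rows, mult in ((a, 100), (list(zip(*a)), 1)):
--       n = len(rows)
--       accum = [0] * (n + 1)
--       # one pass over all unordered row pairs: bucket each pair's full
--       # mismatch count by the reflection line it belongs to
--       for i in range(n):
--         for j in range(i + 1, n):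
--           if (i + j) % 2 == 1:
--             accum[(i + j + 1) // 2] += sum(x != y for x, y in zip(rows[i], rows[j]))
--       for line in range(1, n):
--         if accum[line] == errors:
--           matches.append(mult * line)
--     (res,) = matches
--     answer += res
--   return answer
-- ===== Notes on version B (the rewrite author's own statement) =====
-- stated objective: alternative
-- what changed: Replaces the per-candidate-line outward walk with an early-break error cap by a single pass over all unordered row pairs that buckets each pair's full mismatch count under its reflection line, then reads the matching lines off the bucket array (same on the transpose).
-- outside the precondition, e.g. on Solve([['a', 'ab']], 0): A returns 100, B returns 100; on Solve([['a', 'bb', 'bc']], 0): A returns 200, B raises ValueError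
import Mathlib
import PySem

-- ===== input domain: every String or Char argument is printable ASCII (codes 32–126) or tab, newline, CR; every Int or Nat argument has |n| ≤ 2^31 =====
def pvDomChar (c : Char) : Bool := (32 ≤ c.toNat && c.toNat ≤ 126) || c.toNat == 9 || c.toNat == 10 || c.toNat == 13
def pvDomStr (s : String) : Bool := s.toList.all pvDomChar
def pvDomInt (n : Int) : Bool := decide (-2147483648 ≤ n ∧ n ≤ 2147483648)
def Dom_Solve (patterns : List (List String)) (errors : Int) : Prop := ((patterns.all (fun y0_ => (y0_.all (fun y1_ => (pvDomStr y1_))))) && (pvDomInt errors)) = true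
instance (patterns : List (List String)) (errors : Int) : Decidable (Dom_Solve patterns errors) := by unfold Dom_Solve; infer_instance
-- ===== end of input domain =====

-- B replaces A's per-line outward walk (with early-break error cap) by one pass over all
-- unordered row pairs, bucketing each pair's full mismatch count under its reflection line
-- (objective: alternative decomposition, same asymptotic cost).


-- common helper: Python's `list(zip(*a))` (transpose, truncated to the shortest row);
-- both Pythons contain this very expression, and Pre_ needs it too.
def pvMinW : List (List Char) → Nat
  | [] => 0
  | [r] => r.length
  | r :: rs => min r.length (pvMinW rs)

def pyTranspose (rows : List (List Char)) : List (List Char) :=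
  (List.range (pvMinW rows)).map (fun k => rows.map (fun x => x.getD k ' '))

-- Python `res, = lst` raises ValueError unless lst is a singleton; Pre_ excludes that,
-- so the default 0 of this total form is never reached under Pre_.
def pyUnpack1 (lst : List Int) : Int :=
  match lst with | [x] => x | _ => 0

-- ===== PORT A =====
-- the inner `for k in range(w)` with the `break` once errors > max_errors;
-- a[i][k] is pyGet? (none = IndexError, excluded by Pre_'s rectangularity)
def rowScanA (xi xj : List Char) (maxErrors : Int) : List Int → Int → Int
  | [], e => e
  | k :: rest, e =>
    if PySem.List.pyGet? xi k ≠ PySem.List.pyGet? xj k then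
      if e + 1 > maxErrors then e + 1
      else rowScanA xi xj maxErrors rest (e + 1)
    else rowScanA xi xj maxErrors rest e

-- the `while i >= 0 and j < h` loop; a[i]/a[j] are in range whenever the guard holds
def crLoopA (a : List (List Char)) (w h maxErrors : Int) (i j e : Int) : Int :=
  if 0 ≤ i ∧ j < h then
    crLoopA a w h maxErrors (i - 1) (j + 1)
      (rowScanA (PySem.List.pyGetD a i []) (PySem.List.pyGetD a j [])
        maxErrors (PySem.List.pyRange 0 w 1) e)
  else e
termination_by (i + 1).toNat
decreasing_by omega

def CheckReflection (a : List (List Char)) (j maxErrors : Int) : Int :=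
  -- h = len(a); w = len(a[0]) (a[0] raises on empty a: excluded by Pre_, so headD's default is never read)
  crLoopA a ((a.headD []).length : Int) (a.length : Int) maxErrors (j - 1) j 0

def Solve (patterns : List (List String)) (errors : Int) : Int :=
  patterns.foldl (fun answer p =>
    let a := p.map String.toList
    let b := pyTranspose a
    let lst :=
      ((PySem.List.pyRange 1 (a.length : Int) 1).filter
          (fun r => CheckReflection a r errors == errors)).map (fun r => 100 * r)
      ++ ((PySem.List.pyRange 1 (b.length : Int) 1).filter
          (fun c => CheckReflection b c errors == errors))
    answer + pyUnpack1 lst) 0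

-- ===== PORT B =====
-- sum(x != y for x, y in zip(rows[i], rows[j]))
def pairMM (x y : List Char) : Int :=
  (x.zip y).foldl (fun c q => if q.1 != q.2 then c + 1 else c) 0

-- accum = [0]*(n+1); for i in range(n): for j in range(i+1, n): if (i+j)%2 == 1: accum[(i+j+1)//2] += d
def bucketsB (rows : List (List Char)) : List Int :=
  let n := rows.length
  (List.range n).foldl (fun acc i =>
    (List.range' (i + 1) (n - (i + 1))).foldl (fun acc j =>
      if (i + j) % 2 = 1 then
        acc.set ((i + j + 1) / 2) (acc.getD ((i + j + 1) / 2) 0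
          + pairMM (rows.getD i []) (rows.getD j []))
      else acc) acc) (List.replicate (n + 1) 0)

-- for line in range(1, n): if accum[line] == errors: matches.append(mult * line)
def linesB (rows : List (List Char)) (mult errors : Int) : List Int :=
  let accum := bucketsB rows
  (List.range' 1 (rows.length - 1)).foldl
    (fun ms line => if accum.getD line 0 == errors then ms ++ [mult * (line : Int)] else ms) []

def Solve_alt (patterns : List (List String)) (errors : Int) : Int :=
  patterns.foldl (fun answer p =>
    let a := p.map String.toList
    let ms := linesB a 100 errors ++ linesB (pyTranspose a) 1 errors
    answer + pyUnpack1 ms) 0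

-- ===== PRECONDITION & SPEC =====
-- full (uncapped) mismatch count of a row pair, and of a candidate reflection line
def pvMM (x y : List Char) : Nat := (x.zip y).countP (fun q => q.1 != q.2)

def pvLine (rows : List (List Char)) (r : Nat) : Int :=
  ((List.range (min r (rows.length - r))).map
    (fun t => (pvMM (rows.getD (r - 1 - t) []) (rows.getD (r + t) []) : Int))).sum

-- closed-form column list: for the rectangular patterns Pre_ admits it equals pyTranspose
def pvCols (rows : List (List Char)) : List (List Char) :=
  (List.range ((rows.headD []).length)).map (fun k => rows.map (fun x => x.getD k ' '))

def pvNumMatches (p : List String) (errors : Int) : Nat :=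
  let rows := p.map String.toList
  let cols := pvCols rows
  (List.range' 1 (rows.length - 1)).countP (fun r => pvLine rows r == errors)
  + (List.range' 1 (cols.length - 1)).countP (fun c => pvLine cols c == errors)

-- Pre_ excludes empty or ragged patterns (on which A raises IndexError or, rarely, compares only
-- first-row-width prefixes of each row pair while B's zip truncates per pair and may raise
-- ValueError), and patterns whose number of exact reflection lines is not exactly 1, on which
-- A's `res, =` unpacking raises ValueError.
def Pre_Solve (patterns : List (List String)) (errors : Int) : Prop :=
  ∀ p ∈ patterns, p ≠ [] ∧ (∀ s ∈ p, s.toList.length = (p.headD "").toList.length)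
    ∧ pvNumMatches p errors = 1
instance (patterns : List (List String)) (errors : Int) : Decidable (Pre_Solve patterns errors) := by
  unfold Pre_Solve; infer_instance

def pvWitness_Solve : List (List String) × Int := ([["#.", "#."]], 0)

def Spec_Solve (patterns : List (List String)) (errors : Int) (out : Int) : Prop := out = Solve_alt patterns errors
instance (patterns : List (List String)) (errors : Int) (out : Int) : Decidable (Spec_Solve patterns errors out) := by unfold Spec_Solve; infer_instance

-- ===== CLAIM (what is proved, stated in full; the proofs are below) =====
def Claim_equal_Solve : Prop := ∀ (patterns : List (List String)) (errors : Int), Dom_Solve patterns errors → Pre_Solve patterns errors → Spec_Solve patterns errors (Solve patterns errors)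

-- ===== LEMMAS AND PROOFS =====

-- B's generator sum is the countP form used by the spec
theorem pairMM_eq_pvMM (x y : List Char) : pairMM x y = (pvMM x y : Int) := by
  unfold pairMM pvMM
  rw [PySem.List.foldl_count_if]
  omega

-- countP of positionwise mismatch over range = zip countP, for equal-length rows
theorem count_range_eq_pvMM (x y : List Char) (w : Nat) (hx : x.length = w) (hy : y.length = w) :
    (List.range w).countP (fun k => decide (x[k]? ≠ y[k]?)) = pvMM x y := by
  induction x generalizing y w with
  | nil =>
    simp only [List.length_nil] at hx; subst hx; simp [pvMM]
  | cons a x ih =>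
    cases y with
    | nil => simp at hx hy; omega
    | cons b y =>
      cases w with
      | zero => simp at hx
      | succ w =>
        simp only [List.length_cons, Nat.succ.injEq] at hx hy
        rw [List.range_succ_eq_map, List.countP_cons, List.countP_map]
        have hih := ih y w hx hy
        simp only [pvMM, List.zip_cons_cons, List.countP_cons] at hih ⊢
        rw [← hih]
        simp [Function.comp_def]
        congr 1

-- rowScanA either returns e + the full row mismatch count (when that stays ≤ M), or some value > M
theorem rowScanA_spec (xi xj : List Char) (M : Int) (ks : List Int) (e : Int) :
    (rowScanA xi xj M ks e
        = e + (ks.countP (fun k => decide (PySem.List.pyGet? xi k ≠ PySem.List.pyGet? xj k)) : Int)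
      ∧ e + (ks.countP (fun k => decide (PySem.List.pyGet? xi k ≠ PySem.List.pyGet? xj k)) : Int) ≤ M)
    ∨ (rowScanA xi xj M ks e > M
      ∧ e + (ks.countP (fun k => decide (PySem.List.pyGet? xi k ≠ PySem.List.pyGet? xj k)) : Int) > M) := by
  induction ks generalizing e with
  | nil =>
    simp only [rowScanA, List.countP_nil]
    omega
  | cons k rest ih =>
    simp only [rowScanA]
    by_cases hk : PySem.List.pyGet? xi k ≠ PySem.List.pyGet? xj k
    · have hc : (k :: rest).countP (fun k => decide (PySem.List.pyGet? xi k ≠ PySem.List.pyGet? xj k))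
          = rest.countP (fun k => decide (PySem.List.pyGet? xi k ≠ PySem.List.pyGet? xj k)) + 1 := by
        simp [hk]
      rw [if_pos hk, hc]
      by_cases hM : e + 1 > M
      · rw [if_pos hM]
        rcases ih (e + 1) with ⟨h1, h2⟩ | ⟨h1, h2⟩ <;> right <;> push_cast at * <;> omega
      · rw [if_neg hM]
        rcases ih (e + 1) with ⟨h1, h2⟩ | ⟨h1, h2⟩
        · left; push_cast at *; omega
        · right; push_cast at *; omega
    · have hc : (k :: rest).countP (fun k => decide (PySem.List.pyGet? xi k ≠ PySem.List.pyGet? xj k))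
          = rest.countP (fun k => decide (PySem.List.pyGet? xi k ≠ PySem.List.pyGet? xj k)) := by
        simp [hk]
      rw [if_neg hk, hc]
      exact ih e

-- the full (uncapped) walk count of A's while loop, as a proof-level helper
def walkW (rows : List (List Char)) (i j : Int) : Int :=
  if 0 ≤ i ∧ j < (rows.length : Int) then
    (pvMM (rows.getD i.toNat []) (rows.getD j.toNat []) : Int) + walkW rows (i - 1) (j + 1)
  else 0
termination_by (i + 1).toNat
decreasing_by omega

theorem walkW_nonneg (rows : List (List Char)) (i j : Int) : 0 ≤ walkW rows i j := by
  fun_induction walkW with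
  | case1 i j h ih => positivity
  | case2 i j h => exact le_refl _

theorem rowScanA_cnt (rows : List (List Char)) (w0 : Nat)
    (hrect : ∀ x ∈ rows, x.length = w0) (i j : Int)
    (hi : 0 ≤ i ∧ i < (rows.length : Int)) (hj : 0 ≤ j ∧ j < (rows.length : Int)) :
    ((PySem.List.pyRange 0 (w0 : Int) 1).countP
        (fun k => decide (PySem.List.pyGet? (PySem.List.pyGetD rows i []) k
          ≠ PySem.List.pyGet? (PySem.List.pyGetD rows j []) k)))
      = pvMM (rows.getD i.toNat []) (rows.getD j.toNat []) := by
  have him : rows.getD i.toNat [] ∈ rows := by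
    rw [List.getD_eq_getElem _ _ (by omega)]; exact List.getElem_mem _
  have hjm : rows.getD j.toNat [] ∈ rows := by
    rw [List.getD_eq_getElem _ _ (by omega)]; exact List.getElem_mem _
  rw [PySem.List.pyGetD_eq_getElem _ _ hi.1 (by simpa using hi.2),
      PySem.List.pyGetD_eq_getElem _ _ hj.1 (by simpa using hj.2)]
  rw [PySem.List.pyRange_zero, List.countP_map]
  rw [← count_range_eq_pvMM _ _ w0 (hrect _ him) (hrect _ hjm)]
  · simp only [Int.toNat_natCast, Function.comp_def, PySem.List.pyGet?_natCast]
    rw [List.getD_eq_getElem _ _ (by omega), List.getD_eq_getElem _ _ (by omega)]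

theorem crLoopA_spec (rows : List (List Char)) (w0 : Nat)
    (hrect : ∀ x ∈ rows, x.length = w0) (M : Int) :
    ∀ (fuel : Nat) (i j e : Int), (i + 1).toNat ≤ fuel → i < j →
      (crLoopA rows (w0 : Int) (rows.length : Int) M i j e = e + walkW rows i j
        ∧ e + walkW rows i j ≤ M)
      ∨ (crLoopA rows (w0 : Int) (rows.length : Int) M i j e > M ∧ e + walkW rows i j > M) := by
  intro fuel
  induction fuel with
  | zero =>
    intro i j e hf hij
    rw [crLoopA, if_neg (by omega), walkW, if_neg (by omega)]
    omega
  | succ fuel ih =>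
    intro i j e hf hij
    by_cases hc : 0 ≤ i ∧ j < (rows.length : Int)
    · rw [crLoopA, if_pos hc, walkW, if_pos hc]
      have hrs := rowScanA_spec (PySem.List.pyGetD rows i []) (PySem.List.pyGetD rows j [])
        M (PySem.List.pyRange 0 (w0 : Int) 1) e
      rw [rowScanA_cnt rows w0 hrect i j ⟨hc.1, by omega⟩ ⟨by omega, hc.2⟩] at hrs
      have hW := walkW_nonneg rows (i - 1) (j + 1)
      set e' := rowScanA (PySem.List.pyGetD rows i []) (PySem.List.pyGetD rows j []) M
        (PySem.List.pyRange 0 (w0 : Int) 1) e with he'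
      have hih := ih (i - 1) (j + 1) e' (by omega) (by omega)
      rcases hrs with ⟨h1, h2⟩ | ⟨h1, h2⟩ <;> rcases hih with ⟨g1, g2⟩ | ⟨g1, g2⟩ <;>
        [left; right; right; right] <;> constructor <;> omega
    · rw [crLoopA, if_neg hc, walkW, if_neg hc]
      omega

theorem walkW_eq_sum (rows : List (List Char)) : ∀ (c jj : Nat),
    walkW rows ((c : Int) - 1) (jj : Int)
      = ((List.range (min c (rows.length - jj))).map
          (fun t => (pvMM (rows.getD (c - 1 - t) []) (rows.getD (jj + t) []) : Int))).sum := by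
  intro c
  induction c with
  | zero =>
    intro jj
    rw [walkW, if_neg (by omega)]
    simp
  | succ c ih =>
    intro jj
    by_cases hjj : jj < rows.length
    · have hcast : ((c + 1 : Nat) : Int) - 1 = (c : Int) := by push_cast; ring
      rw [hcast, walkW, if_pos (by constructor <;> [omega; exact_mod_cast hjj])]
      have hmin : min (c + 1) (rows.length - jj) = min c (rows.length - (jj + 1)) + 1 := by omega
      rw [hmin, List.range_succ_eq_map, List.map_cons, List.sum_cons, List.map_map]
      have h1 : ((c : Int)).toNat = c := by omega
      have h2 : ((jj : Int)).toNat = jj := by omega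
      have h3 : ((jj : Int)) + 1 = ((jj + 1 : Nat) : Int) := by push_cast; ring
      rw [h1, h2, h3, ih (jj + 1)]
      congr 1
      refine congrArg List.sum (List.map_congr_left fun t ht => ?_)
      simp only [Function.comp_def, Nat.succ_eq_add_one]
      have e1 : c - 1 - t = c - (t + 1) := by omega
      have e2 : jj + 1 + t = jj + (t + 1) := by omega
      have e3 : c + 1 - 1 - (t + 1) = c - (t + 1) := by omega
      rw [e1, e2, e3]
    · rw [walkW, if_neg (by omega)]
      have : min (c + 1) (rows.length - jj) = 0 := by omega
      rw [this]
      simp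

theorem check_iff (rows : List (List Char)) (w0 : Nat)
    (hrect : ∀ x ∈ rows, x.length = w0) (hw : (rows.headD []).length = w0)
    (errors : Int) (r : Nat) (hr : 1 ≤ r) :
    (CheckReflection rows (r : Int) errors == errors) = (pvLine rows r == errors) := by
  have hpv : walkW rows ((r : Int) - 1) (r : Int) = pvLine rows r := by
    rw [walkW_eq_sum rows r r]
    rfl
  rw [CheckReflection, hw]
  rcases crLoopA_spec rows w0 hrect errors r ((r : Int) - 1) (r : Int) 0 (by omega) (by omega)
    with ⟨a1, a2⟩ | ⟨a1, a2⟩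
  · rw [hpv] at a1
    rw [a1, zero_add]
  · rw [hpv] at a2
    apply Bool.eq_iff_iff.mpr
    simp only [beq_iff_eq]
    constructor <;> intro hx <;> omega

-- generic characterisation of B's bucket-accumulation fold
theorem foldl_bucket {α : Type} (key : α → Nat) (v : α → Int) (c : α → Bool) :
    ∀ (ps : List α) (acc : List Int) (L : Nat), L < acc.length →
      (∀ q ∈ ps, c q = true → key q < acc.length) →
      (ps.foldl (fun a q => if c q then a.set (key q) (a.getD (key q) 0 + v q) else a) acc).getD L 0
        = acc.getD L 0 + ((ps.filter (fun q => c q && (key q == L))).map v).sum := by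
  intro ps
  induction ps with
  | nil => intro acc L hL hk; simp
  | cons q ps ih =>
    intro acc L hL hk
    simp only [List.foldl_cons]
    by_cases hc : c q = true
    · rw [if_pos hc]
      rw [ih _ L (by simpa using hL) (fun r hr hcr => by simpa using hk r (by simp [hr]) hcr)]
      by_cases hkL : key q = L
      · rw [List.filter_cons_of_pos (by simp [hc, hkL])]
        simp only [List.map_cons, List.sum_cons]
        rw [List.getD_eq_getElem?_getD, List.getElem?_set, if_pos hkL, if_pos (by omega), hkL]
        simp only [Option.getD_some]
        ring
      · rw [List.filter_cons_of_neg (by simp [hkL])]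
        rw [List.getD_eq_getElem?_getD, List.getElem?_set, if_neg hkL,
          ← List.getD_eq_getElem?_getD]
    · rw [if_neg hc]
      rw [List.filter_cons_of_neg (by simp [hc])]
      exact ih acc L hL (fun r hr hcr => hk r (by simp [hr]) hcr)

-- the flat pair list B's two nested loops traverse
def pvPairs (n : Nat) : List (Nat × Nat) :=
  (List.range n).flatMap (fun i => (List.range' (i + 1) (n - (i + 1))).map (fun j => (i, j)))

theorem mem_pvPairs (n : Nat) (q : Nat × Nat) : q ∈ pvPairs n ↔ q.1 < q.2 ∧ q.2 < n := by
  cases q with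
  | mk i j =>
    simp only [pvPairs, List.mem_flatMap, List.mem_range, List.mem_map, List.mem_range'_1]
    constructor
    · rintro ⟨i', hi', j', hj', he⟩
      cases he
      omega
    · rintro ⟨h1, h2⟩
      exact ⟨i, by omega, j, by omega, rfl⟩

theorem bucketsB_getD (rows : List (List Char)) (L : Nat) (hL : L < rows.length + 1) :
    (bucketsB rows).getD L 0
      = (((pvPairs rows.length).filter
            (fun q => ((q.1 + q.2) % 2 == 1) && ((q.1 + q.2 + 1) / 2 == L))).map
          (fun q => pairMM (rows.getD q.1 []) (rows.getD q.2 []))).sum := by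
  have hb : bucketsB rows
      = (pvPairs rows.length).foldl
          (fun a q => if (q.1 + q.2) % 2 == 1 then
            a.set ((q.1 + q.2 + 1) / 2) (a.getD ((q.1 + q.2 + 1) / 2) 0
              + pairMM (rows.getD q.1 []) (rows.getD q.2 []))
          else a) (List.replicate (rows.length + 1) 0) := by
    rw [pvPairs, List.foldl_flatMap]
    unfold bucketsB
    apply PySem.List.foldl_congr_mem
    intro acc i _
    rw [List.foldl_map]
    apply PySem.List.foldl_congr_mem
    intro acc' j _
    by_cases hp : (i + j) % 2 = 1
    · rw [if_pos hp, if_pos (by simpa using hp)]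
    · rw [if_neg hp, if_neg (by simpa using hp)]
  rw [hb, foldl_bucket _ _ _ _ _ L (by simpa using hL) ?side]
  · rw [List.getD_replicate _ (by omega), zero_add]
  case side =>
    intro q hq _
    rw [mem_pvPairs] at hq
    simp only [List.length_replicate]
    omega

theorem nodup_pvPairs (n : Nat) : (pvPairs n).Nodup := by
  rw [pvPairs, List.nodup_flatMap]
  constructor
  · intro i _
    exact (List.nodup_range').map (fun a b h => by cases h; rfl)
  · apply List.Pairwise.imp ?_ (List.pairwise_lt_range)
    intro a b hab q hqa hqb
    simp only [List.mem_map] at hqa hqb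
    obtain ⟨j1, _, h1⟩ := hqa
    obtain ⟨j2, _, h2⟩ := hqb
    rw [← h1] at h2
    cases h2
    omega

theorem bucket_eq_pvLine (rows : List (List Char)) (L : Nat) (h1 : 1 ≤ L) (h2 : L < rows.length) :
    (bucketsB rows).getD L 0 = pvLine rows L := by
  rw [bucketsB_getD rows L (by omega)]
  have hperm : ((pvPairs rows.length).filter
        (fun q => ((q.1 + q.2) % 2 == 1) && ((q.1 + q.2 + 1) / 2 == L))).Perm
      ((List.range (min L (rows.length - L))).map (fun t => (L - 1 - t, L + t))) := by
    rw [List.perm_ext_iff_of_nodup (List.Nodup.filter _ (nodup_pvPairs _))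
      ((List.nodup_range).map (by intro a b h; simp only [Prod.mk.injEq] at h; omega))]
    intro q
    rw [List.mem_filter, mem_pvPairs]
    simp only [List.mem_map, List.mem_range, Bool.and_eq_true, beq_iff_eq]
    constructor
    · rintro ⟨⟨hlt, hn⟩, hodd, hdiv⟩
      refine ⟨q.2 - L, by omega, ?_⟩
      have : q.1 = L - 1 - (q.2 - L) ∧ q.2 = L + (q.2 - L) := by omega
      rw [← Prod.mk.eta (p := q), ← this.1, ← this.2]
    · rintro ⟨t, ht, he⟩
      rw [← he]
      refine ⟨⟨by omega, by omega⟩, by omega, by omega⟩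
  rw [hperm.map _ |>.sum_eq, List.map_map, pvLine]
  apply congrArg List.sum
  apply List.map_congr_left
  intro t ht
  simp only [List.mem_range] at ht
  simp only [Function.comp_def]
  rw [pairMM_eq_pvMM]

-- per orientation: A's filtered line list equals B's bucket-derived line list
theorem orient_eq (rows : List (List Char)) (w0 : Nat)
    (hrect : ∀ x ∈ rows, x.length = w0) (hw : (rows.headD []).length = w0)
    (mult errors : Int) :
    ((PySem.List.pyRange 1 (rows.length : Int) 1).filter
        (fun r => CheckReflection rows r errors == errors)).map (fun r => mult * r)
      = linesB rows mult errors := by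
  have hn : (((rows.length : Int)) - 1).toNat = rows.length - 1 := by omega
  simp only [linesB]
  rw [PySem.List.foldl_append_if, List.nil_append]
  rw [PySem.List.pyRange_one, hn, List.filter_map, List.map_map,
    List.range'_eq_map_range, List.filter_map, List.map_map]
  have hfil : List.filter ((fun r => CheckReflection rows r errors == errors)
        ∘ (fun k : Nat => (1 : Int) + (k : Int))) (List.range (rows.length - 1))
      = List.filter ((fun line => (bucketsB rows).getD line 0 == errors)
        ∘ (fun k : Nat => 1 + k)) (List.range (rows.length - 1)) := by
    apply List.filter_congr
    intro k hk
    simp only [List.mem_range] at hk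
    simp only [Function.comp_def]
    have hc : (1 : Int) + (k : Int) = ((1 + k : Nat) : Int) := by push_cast; ring
    rw [hc, check_iff rows w0 hrect hw errors (1 + k) (by omega),
      bucket_eq_pvLine rows (1 + k) (by omega) (by omega)]
  rw [hfil]
  apply List.map_congr_left
  intro k hk
  simp only [Function.comp_def]
  push_cast
  ring

theorem transpose_len (rows : List (List Char)) :
    ∀ x ∈ pyTranspose rows, x.length = rows.length := by
  intro x hx
  simp only [pyTranspose, List.mem_map, List.mem_range] at hx
  obtain ⟨k, _, he⟩ := hx
  rw [← he, List.length_map]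

theorem transpose_rect (rows : List (List Char)) :
    ∀ x ∈ pyTranspose rows, x.length = ((pyTranspose rows).headD []).length := by
  intro x hx
  cases hcols : pyTranspose rows with
  | nil => rw [hcols] at hx; cases hx
  | cons y ys =>
    rw [hcols] at hx
    have hy := transpose_len rows y (by rw [hcols]; exact List.mem_cons_self)
    have hxl := transpose_len rows x (by rw [hcols]; exact hx)
    simp [hxl, hy]

theorem headD_map_toList (p : List String) (hne : p ≠ []) :
    (p.map String.toList).headD [] = (p.headD "").toList := by
  cases p with
  | nil => exact absurd rfl hne
  | cons s t => rfl

-- ===== VERDICT (by name: the statement is the Claim_ definition above) =====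
theorem Solve_spec : Claim_equal_Solve := by
  unfold Claim_equal_Solve
  intro patterns errors hdom hpre
  unfold Spec_Solve Solve Solve_alt
  apply PySem.List.foldl_congr_mem
  intro acc p hp
  obtain ⟨hne, hrect, _⟩ := hpre p hp
  dsimp only
  congr 1
  apply congrArg pyUnpack1
  congr 1
  · apply orient_eq _ ((p.map String.toList).headD []).length ?_ rfl
    intro x hx
    simp only [List.mem_map] at hx
    obtain ⟨s, hs, he⟩ := hx
    rw [← he, headD_map_toList p hne]
    exact hrect s hs
  · have hid : ∀ l : List Int, l.map (fun r => (1 : Int) * r) = l := by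
      intro l; simp
    rw [← hid (((PySem.List.pyRange 1 ((pyTranspose (p.map String.toList)).length : Int) 1).filter
      (fun c => CheckReflection (pyTranspose (p.map String.toList)) c errors == errors)))]
    exact orient_eq _ (((pyTranspose (p.map String.toList)).headD []).length)
      (transpose_rect _) rfl 1 errors
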